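-- pv_equiv track=rewrite | github.com/Thomastienn/astronvimconfig | snippets/python/graph/hierholzer.py | hierholzer_undirected
-- ===== SOURCE A (Python) =====
-- from collections import defaultdict
--
-- def hierholzer_undirected(n, edges, start):
--     """
--     Args:
--         n: number of vertices
--         edges: list of (u, v) tuples
--         start: starting vertex
--     Returns:
--         list representing Eulerian path/circuit
--     """
--     adj = defaultdict(list)
--     used = [False] * len(edges)
--
--     for i, (u, v) in enumerate(edges):
--         adj[u].append((v, i))
--         adj[v].append((u, i))
--
--     path = []
--     stack = [start]
--
--     while stack:
--         u = stack[-1]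
--
--         # Remove used edges from adjacency list
--         while adj[u] and used[adj[u][-1][1]]:
--             adj[u].pop()
--
--         if not adj[u]:
--             path.append(u)
--             stack.pop()
--         else:
--             v, idx = adj[u].pop()
--             used[idx] = True
--             stack.append(v)
--
--     return path[::-1]
-- ===== SOURCE B (Python) =====
-- from collections import defaultdict
--
-- def hierholzer_undirected(n, edges, start):
--     """
--     Args:
--         n: number of vertices
--         edges: list of (u, v) tuples
--         start: starting vertex
--     Returns:
--         list representing Eulerian path/circuit
--     """
--     adj = defaultdict(list)
--     used = [False] * len(edges)
--
--     for i, (u, v) in enumerate(edges):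
--         adj[u].append((v, i))
--         adj[v].append((u, i))
--
--     path = []
--
--     def dfs(u):
--         while adj[u]:
--             v, idx = adj[u].pop()
--             if used[idx]:
--                 continue
--             used[idx] = True
--             dfs(v)
--         path.append(u)
--
--     dfs(start)
--     return path[::-1]
-- ===== Notes on version B (the rewrite author's own statement) =====
-- stated objective: alternative
-- what changed: Replaces A's explicit-stack loop (with its inner used-edge pruning while) by a recursive DFS helper that pops edges from the end of each adjacency list, skips used ones, recurses, and appends the vertex in postorder; same O(V+E) cost, different control structure.
import Mathlib
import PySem

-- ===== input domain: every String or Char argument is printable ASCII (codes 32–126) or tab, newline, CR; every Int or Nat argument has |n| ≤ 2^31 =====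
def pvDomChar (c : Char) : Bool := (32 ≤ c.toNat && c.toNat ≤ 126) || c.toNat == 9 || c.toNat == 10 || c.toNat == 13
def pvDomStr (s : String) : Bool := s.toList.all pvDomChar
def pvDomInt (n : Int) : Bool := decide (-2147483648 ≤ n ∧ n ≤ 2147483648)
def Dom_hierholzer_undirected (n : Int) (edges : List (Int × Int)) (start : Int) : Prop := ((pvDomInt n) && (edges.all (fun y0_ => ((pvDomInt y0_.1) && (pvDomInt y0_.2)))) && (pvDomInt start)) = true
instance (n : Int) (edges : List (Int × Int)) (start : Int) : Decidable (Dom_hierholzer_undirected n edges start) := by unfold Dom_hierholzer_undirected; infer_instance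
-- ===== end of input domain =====

-- B replaces A's explicit-stack loop by a recursive postorder DFS over the same indexed
-- adjacency lists; same edge order and output, different control structure (no speed claim).


-- ===== PORT A =====
-- Shared association-list model of the defaultdict(list): lookup (default []) and update.
-- Both Pythons only ever read adj[u] and mutate adj[u] in place, never iterate the dict,
-- so the key-creating side effect of defaultdict.__getitem__ is unobservable and not modelled.
abbrev pvAL := List (Int × List (Int × Nat))

def pvAlGet (d : pvAL) (k : Int) : List (Int × Nat) :=
  match d with
  | [] => []
  | (k', v) :: t => if k' = k then v else pvAlGet t k

def pvAlSet (d : pvAL) (k : Int) (v : List (Int × Nat)) : pvAL :=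
  match d with
  | [] => [(k, v)]
  | (k', v') :: t => if k' = k then (k, v) :: t else (k', v') :: pvAlSet t k v

def pvAlSize (d : pvAL) : Nat := (d.map (fun p => p.2.length)).sum

-- for i, (u, v) in enumerate(edges): adj[u].append((v, i)); adj[v].append((u, i))
def pvBuildAdj (edges : List (Int × Int)) : pvAL :=
  edges.zipIdx.foldl
    (fun d e =>
      let d1 := pvAlSet d e.1.1 (pvAlGet d e.1.1 ++ [(e.1.2, e.2)])
      pvAlSet d1 e.1.2 (pvAlGet d1 e.1.2 ++ [(e.1.1, e.2)]))
    []

theorem pvAlSet_size (d : pvAL) (k : Int) (v : List (Int × Nat)) :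
    pvAlSize (pvAlSet d k v) + (pvAlGet d k).length = pvAlSize d + v.length := by
  induction d with
  | nil => simp [pvAlSet, pvAlGet, pvAlSize]
  | cons hd t ih =>
    by_cases h : hd.1 = k <;>
      simp [pvAlSet, pvAlGet, pvAlSize, h] at ih ⊢ <;> omega

theorem pvAlSet_dropLast_lt (adj : pvAL) (u : Int) (x : (Int × Nat))
    (h : (pvAlGet adj u).getLast? = some x) :
    pvAlSize (pvAlSet adj u (pvAlGet adj u).dropLast) < pvAlSize adj := by
  have hs := pvAlSet_size adj u (pvAlGet adj u).dropLast
  have hne : pvAlGet adj u ≠ [] := by intro he; simp [he] at h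
  have hpos : 0 < (pvAlGet adj u).length := List.length_pos_iff.mpr hne
  simp [List.length_dropLast] at hs
  omega

-- A's while loop, flattened: each step is either one inner-while pop of a used edge
-- (stack unchanged), the stack pop with path append when adj[u] is exhausted, or the
-- pop of an unused edge with the push of its endpoint.
def pvLoopA (adj : pvAL) (used : List Bool) (stack : List Int) (path : List Int) : List Int :=
  match stack with
  | [] => path
  | u :: rest =>
    match h : (pvAlGet adj u).getLast? with
    | none => pvLoopA adj used rest (path ++ [u])
    | some (v, idx) =>
      if used.getD idx false then
        pvLoopA (pvAlSet adj u (pvAlGet adj u).dropLast) used (u :: rest) path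
      else
        pvLoopA (pvAlSet adj u (pvAlGet adj u).dropLast) (used.set idx true)
          (v :: u :: rest) path
termination_by 2 * pvAlSize adj + stack.length
decreasing_by
  · simp
  · have := pvAlSet_dropLast_lt adj u (v, idx) h
    simp only [List.length_cons]; omega
  · have := pvAlSet_dropLast_lt adj u (v, idx) h
    simp only [List.length_cons]; omega

def hierholzer_undirected (n : Int) (edges : List (Int × Int)) (start : Int) : List Int :=
  let adj := pvBuildAdj edges
  let used := List.replicate edges.length false
  (pvLoopA adj used [start] []).reverse

-- ===== PORT B =====
-- def dfs(u): while adj[u]: v, idx = adj[u].pop(); if used[idx]: continue;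
--             used[idx] = True; dfs(v); then path.append(u)
-- The subtype certifies that dfs never grows the adjacency store (needed for termination).
def pvDfs (u : Int) (adj : pvAL) (used : List Bool) (path : List Int) :
    {s : pvAL × List Bool × List Int // pvAlSize s.1 ≤ pvAlSize adj} :=
  match h : (pvAlGet adj u).getLast? with
  | none => ⟨(adj, used, path ++ [u]), Nat.le_refl _⟩
  | some (v, idx) =>
    have hlt : pvAlSize (pvAlSet adj u (pvAlGet adj u).dropLast) < pvAlSize adj :=
      pvAlSet_dropLast_lt adj u (v, idx) h
    if used.getD idx false then
      let r := pvDfs u (pvAlSet adj u (pvAlGet adj u).dropLast) used path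
      ⟨r.1, Nat.le_trans r.2 (Nat.le_of_lt hlt)⟩
    else
      let r1 := pvDfs v (pvAlSet adj u (pvAlGet adj u).dropLast) (used.set idx true) path
      let r2 := pvDfs u r1.1.1 r1.1.2.1 r1.1.2.2
      ⟨r2.1, Nat.le_trans (Nat.le_trans r2.2 r1.2) (Nat.le_of_lt hlt)⟩
termination_by pvAlSize adj
decreasing_by
  · exact hlt
  · exact hlt
  · exact Nat.lt_of_le_of_lt r1.2 hlt

def hierholzer_undirected_alt (n : Int) (edges : List (Int × Int)) (start : Int) : List Int :=
  let adj := pvBuildAdj edges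
  let used := List.replicate edges.length false
  ((pvDfs start adj used []).1.2.2).reverse

-- ===== PRECONDITION & SPEC =====
def Spec_hierholzer_undirected (n : Int) (edges : List (Int × Int)) (start : Int) (out : List Int) : Prop := out = hierholzer_undirected_alt n edges start
instance (n : Int) (edges : List (Int × Int)) (start : Int) (out : List Int) : Decidable (Spec_hierholzer_undirected n edges start out) := by unfold Spec_hierholzer_undirected; infer_instance

-- ===== CLAIM (what is proved, stated in full; the proofs are below) =====
def Claim_equal_hierholzer_undirected : Prop := ∀ (n : Int) (edges : List (Int × Int)) (start : Int), Dom_hierholzer_undirected n edges start → Spec_hierholzer_undirected n edges start (hierholzer_undirected n edges start)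

-- ===== LEMMAS AND PROOFS =====
theorem pvLoopA_nil (adj : pvAL) (used : List Bool) (path : List Int) :
    pvLoopA adj used [] path = path := by
  rw [pvLoopA]

theorem pvLoopA_none (adj : pvAL) (used : List Bool) (u : Int) (rest path : List Int)
    (h : (pvAlGet adj u).getLast? = none) :
    pvLoopA adj used (u :: rest) path = pvLoopA adj used rest (path ++ [u]) := by
  rw [pvLoopA]
  split
  · rfl
  · rename_i v idx heq; rw [h] at heq; cases heq

theorem pvLoopA_used (adj : pvAL) (used : List Bool) (u v : Int) (idx : Nat)
    (rest path : List Int) (h : (pvAlGet adj u).getLast? = some (v, idx))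
    (hu : used.getD idx false = true) :
    pvLoopA adj used (u :: rest) path =
      pvLoopA (pvAlSet adj u (pvAlGet adj u).dropLast) used (u :: rest) path := by
  rw [pvLoopA]
  split
  · rename_i heq; rw [h] at heq; cases heq
  · rename_i v' idx' heq; rw [h] at heq; cases heq; rw [if_pos hu]

theorem pvLoopA_new (adj : pvAL) (used : List Bool) (u v : Int) (idx : Nat)
    (rest path : List Int) (h : (pvAlGet adj u).getLast? = some (v, idx))
    (hu : ¬ used.getD idx false = true) :
    pvLoopA adj used (u :: rest) path =
      pvLoopA (pvAlSet adj u (pvAlGet adj u).dropLast) (used.set idx true)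
        (v :: u :: rest) path := by
  rw [pvLoopA]
  split
  · rename_i heq; rw [h] at heq; cases heq
  · rename_i v' idx' heq; rw [h] at heq; cases heq; rw [if_neg hu]

theorem pvDfs_none (u : Int) (adj : pvAL) (used : List Bool) (path : List Int)
    (h : (pvAlGet adj u).getLast? = none) :
    (pvDfs u adj used path).1 = (adj, used, path ++ [u]) := by
  rw [pvDfs]
  split
  · rfl
  · rename_i v idx heq; rw [h] at heq; cases heq

theorem pvDfs_used (u v : Int) (idx : Nat) (adj : pvAL) (used : List Bool) (path : List Int)
    (h : (pvAlGet adj u).getLast? = some (v, idx)) (hu : used.getD idx false = true) :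
    (pvDfs u adj used path).1 =
      (pvDfs u (pvAlSet adj u (pvAlGet adj u).dropLast) used path).1 := by
  rw [pvDfs]
  split
  · rename_i heq; rw [h] at heq; cases heq
  · rename_i v' idx' heq; rw [h] at heq; cases heq; rw [if_pos hu]

theorem pvDfs_new (u v : Int) (idx : Nat) (adj : pvAL) (used : List Bool) (path : List Int)
    (h : (pvAlGet adj u).getLast? = some (v, idx)) (hu : ¬ used.getD idx false = true) :
    (pvDfs u adj used path).1 =
      (pvDfs u
        (pvDfs v (pvAlSet adj u (pvAlGet adj u).dropLast) (used.set idx true) path).1.1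
        (pvDfs v (pvAlSet adj u (pvAlGet adj u).dropLast) (used.set idx true) path).1.2.1
        (pvDfs v (pvAlSet adj u (pvAlGet adj u).dropLast) (used.set idx true) path).1.2.2).1 := by
  rw [pvDfs]
  split
  · rename_i heq; rw [h] at heq; cases heq
  · rename_i v' idx' heq; rw [h] at heq; cases heq; rw [if_neg hu]

-- Simulation: one run of A's loop with u on top of the stack performs exactly the state
-- change of B's dfs at u, after which the loop resumes with the rest of the stack.
theorem pv_sim (k : Nat) : ∀ (adj : pvAL), pvAlSize adj = k →
    ∀ (u : Int) (used : List Bool) (path : List Int) (rest : List Int),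
    pvLoopA adj used (u :: rest) path =
      pvLoopA (pvDfs u adj used path).1.1 (pvDfs u adj used path).1.2.1 rest
        (pvDfs u adj used path).1.2.2 := by
  induction k using Nat.strong_induction_on with
  | _ k ih =>
    intro adj hk u used path rest
    cases h : (pvAlGet adj u).getLast? with
    | none =>
      rw [pvLoopA_none adj used u rest path h, pvDfs_none u adj used path h]
    | some p =>
      obtain ⟨v, idx⟩ := p
      have hlt : pvAlSize (pvAlSet adj u (pvAlGet adj u).dropLast) < k := by
        rw [← hk]; exact pvAlSet_dropLast_lt adj u (v, idx) h
      by_cases hu : used.getD idx false = true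
      · rw [pvLoopA_used adj used u v idx rest path h hu,
          pvDfs_used u v idx adj used path h hu]
        exact ih _ hlt _ rfl u used path rest
      · rw [pvLoopA_new adj used u v idx rest path h hu,
          pvDfs_new u v idx adj used path h hu]
        rw [ih _ hlt _ rfl v (used.set idx true) path (u :: rest)]
        exact ih _ (Nat.lt_of_le_of_lt (pvDfs v _ _ path).2 hlt) _ rfl u _ _ rest

-- ===== VERDICT (by name: the statement is the Claim_ definition above) =====
theorem hierholzer_undirected_spec : Claim_equal_hierholzer_undirected := by
  intro n edges start _
  show (pvLoopA (pvBuildAdj edges) (List.replicate edges.length false) [start] []).reverse =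
    ((pvDfs start (pvBuildAdj edges) (List.replicate edges.length false) []).1.2.2).reverse
  rw [pv_sim (pvAlSize (pvBuildAdj edges)) _ rfl, pvLoopA_nil]
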